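-- pv_equiv track=rewrite | github.com/sagemath/sagetrac-mirror | src/sage/combinat/cha/_my_wqsym/fundamental_dual_basis.py | _calcul_coef
-- ===== SOURCE A (Python) =====
-- def _calcul_coef(e):
--         if len(e)==0:
--                 return [1]
--         i=min(e)
--         res=[]
--         while i<=max(e):
--                 k=1
--                 while i in e:
--                         i+=1
--                         k+=1
--                 res+=[k]
--                 i+=1
--         return res
-- ===== SOURCE B (Python) =====
-- def _calcul_coef(e):
--     if not e:
--         return [1]
--     vs = sorted(set(e))
--     res = []
--     L = 1
--     for prev, cur in zip(vs, vs[1:]):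
--         if cur == prev + 1:
--             L += 1
--         else:
--             res.append(L + 1)
--             res.extend([1] * (cur - prev - 2))
--             L = 1
--     res.append(L + 1)
--     return res
-- ===== Notes on version B (the rewrite author's own statement) =====
-- stated objective: faster
-- what changed: Replaces A's integer-by-integer scan of [min(e), max(e)] with an O(n^2) 'i in e' membership test at every position by sorting the deduplicated elements once and walking adjacent pairs, emitting each run's length and the gap's 1-fillers arithmetically.
import Mathlib
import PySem

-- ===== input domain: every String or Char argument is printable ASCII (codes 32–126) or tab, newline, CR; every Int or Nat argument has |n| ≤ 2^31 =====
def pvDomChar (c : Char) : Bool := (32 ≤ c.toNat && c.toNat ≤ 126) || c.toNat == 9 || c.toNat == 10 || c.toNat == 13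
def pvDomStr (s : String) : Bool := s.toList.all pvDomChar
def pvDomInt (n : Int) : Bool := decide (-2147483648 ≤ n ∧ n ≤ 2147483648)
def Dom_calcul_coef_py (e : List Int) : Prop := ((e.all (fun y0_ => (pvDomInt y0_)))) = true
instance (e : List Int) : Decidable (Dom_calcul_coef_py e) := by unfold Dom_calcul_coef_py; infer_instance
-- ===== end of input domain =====

-- B replaces A's integer-by-integer scan of [min(e), max(e)] with nested membership tests
-- by a single walk over sorted(set(e)) that emits run lengths and gap fillers (objective: faster).

-- ===== PORT A =====

-- termination helper for the inner `while i in e` loop: the number of elements ≥ i shrinks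
theorem pvCount_succ_lt (e : List Int) (i : Int) (h : i ∈ e) :
    e.countP (fun x => decide (i + 1 ≤ x)) < e.countP (fun x => decide (i ≤ x)) := by
  induction e with
  | nil => cases h
  | cons a t ih =>
    simp only [List.countP_cons]
    rcases List.mem_cons.mp h with rfl | hm
    · have hmono : t.countP (fun x => decide (i < x)) ≤ t.countP (fun x => decide (i ≤ x)) := by
        apply List.countP_mono_left
        intro x _ hx
        simp only [decide_eq_true_eq] at hx ⊢
        omega
      have h1 : (decide (i + 1 ≤ i)) = false := by simp
      have h2 : (decide (i ≤ i)) = true := by simp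
      rw [h1, h2]; simp; omega
    · have := ih hm
      split_ifs with h1 h2 h2 <;> simp_all <;> omega

-- inner `while i in e: i+=1; k+=1` loop of A
def innerA (e : List Int) (i k : Int) : Int × Int :=
  if h : i ∈ e then innerA e (i + 1) (k + 1) else (i, k)
termination_by e.countP (fun x => decide (i ≤ x))
decreasing_by exact pvCount_succ_lt e i h

theorem innerA_fst_ge (e : List Int) (i k : Int) : i ≤ (innerA e i k).1 := by
  rw [innerA]
  split
  next h =>
    have := innerA_fst_ge e (i + 1) (k + 1)
    omega
  next h => simp
termination_by e.countP (fun x => decide (i ≤ x))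
decreasing_by exact pvCount_succ_lt e i ‹i ∈ e›

-- outer `while i <= max(e)` loop of A
def outerA (e : List Int) (mx : Int) (i : Int) (res : List Int) : List Int :=
  if i ≤ mx then
    outerA e mx ((innerA e i 1).1 + 1) (res ++ [(innerA e i 1).2])
  else res
termination_by (mx + 1 - i).toNat
decreasing_by have := innerA_fst_ge e i 1; omega

def calcul_coef_py (e : List Int) : List Int :=
  if e.length = 0 then [1]
  else
    outerA e ((PySem.List.max? e (fun x => x)).getD 0)
      ((PySem.List.min? e (fun x => x)).getD 0) []

-- ===== PORT B =====

-- loop body of B's `for prev, cur in zip(vs, vs[1:])`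
def bStep (st : List Int × Int) (pc : Int × Int) : List Int × Int :=
  if pc.2 = pc.1 + 1 then (st.1, st.2 + 1)
  else (st.1 ++ [st.2 + 1] ++ List.replicate (pc.2 - pc.1 - 2).toNat 1, 1)

def calcul_coef_py_alt (e : List Int) : List Int :=
  if e = [] then [1]
  else
    let vs := PySem.List.sorted (PySem.Set.ofList e) (fun x => x) false
    let st := (vs.zip vs.tail).foldl bStep ([], (1 : Int))
    st.1 ++ [st.2 + 1]

-- ===== PRECONDITION & SPEC =====
def Spec_calcul_coef_py (e : List Int) (out : List Int) : Prop := out = calcul_coef_py_alt e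
instance (e : List Int) (out : List Int) : Decidable (Spec_calcul_coef_py e out) := by unfold Spec_calcul_coef_py; infer_instance

-- ===== CLAIM (what is proved, stated in full; the proofs are below) =====
def Claim_equal_calcul_coef_py : Prop := ∀ (e : List Int), Dom_calcul_coef_py e → Spec_calcul_coef_py e (calcul_coef_py e)

-- ===== LEMMAS AND PROOFS =====

theorem innerA_mem {e : List Int} {i : Int} (k : Int) (h : i ∈ e) :
    innerA e i k = innerA e (i + 1) (k + 1) := by rw [innerA]; simp [h]

theorem innerA_not_mem {e : List Int} {i : Int} (k : Int) (h : i ∉ e) :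
    innerA e i k = (i, k) := by rw [innerA]; simp [h]

theorem outerA_le {e : List Int} {mx i : Int} (res : List Int) (h : i ≤ mx) :
    outerA e mx i res = outerA e mx ((innerA e i 1).1 + 1) (res ++ [(innerA e i 1).2]) := by
  rw [outerA]; simp [h]

theorem outerA_gt {e : List Int} {mx i : Int} (res : List Int) (h : ¬ i ≤ mx) :
    outerA e mx i res = res := by rw [outerA]; simp [h]

-- common reference: walk the strictly-increasing element list emitting run lengths and gap ones
def gRun (v k : Int) : List Int → List Int
  | [] => [k + 1]
  | c :: l' =>
    if c = v + 1 then gRun c (k + 1) l'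
    else (k + 1) :: (List.replicate (c - v - 2).toNat 1 ++ gRun c 1 l')

theorem bfold (l : List Int) : ∀ (v k : Int) (res : List Int),
    (((v :: l).zip l).foldl bStep (res, k)).1 ++ [(((v :: l).zip l).foldl bStep (res, k)).2 + 1]
      = res ++ gRun v k l := by
  induction l with
  | nil => intro v k res; simp [gRun]
  | cons c l' ih =>
    intro v k res
    by_cases hc : c = v + 1
    · simpa [List.zip, bStep, hc, gRun] using ih c (k + 1) res
    · have h3 := ih c 1 (res ++ (k + 1) :: List.replicate (c - v - 2).toNat 1)
      simpa [List.zip, bStep, hc, gRun, List.append_assoc] using h3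

theorem gapA (e : List Int) (mx : Int) : ∀ (d : Nat) (i : Int) (res : List Int),
    (∀ j : Int, i ≤ j → j < i + d → j ∉ e) → i + d ≤ mx + 1 →
    outerA e mx i res = outerA e mx (i + d) (res ++ List.replicate d 1) := by
  intro d
  induction d with
  | zero => intro i res _ _; simp
  | succ d ih =>
    intro i res hgap hb
    have hi : i ≤ mx := by omega
    have hne : i ∉ e := hgap i le_rfl (by push_cast; omega)
    rw [outerA_le res hi, innerA_not_mem 1 hne]
    have := ih (i + 1) (res ++ [1]) (fun j h1 h2 => hgap j (by omega) (by push_cast at h2 ⊢; omega))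
      (by push_cast at hb ⊢; omega)
    rw [this]
    congr 1
    · push_cast; ring
    · simp [List.replicate_succ]

theorem pairwise_head_le {v : Int} {l : List Int} (hp : (v :: l).Pairwise (· < ·)) :
    ∀ x ∈ v :: l, v ≤ x := by
  intro x hx
  rcases List.mem_cons.mp hx with rfl | hx
  · exact le_rfl
  · exact le_of_lt ((List.pairwise_cons.mp hp).1 x hx)

theorem mainA (e : List Int) (mx : Int) : ∀ (l : List Int) (v k : Int) (res : List Int),
    (∀ x : Int, v ≤ x → (x ∈ e ↔ x ∈ v :: l)) →
    (v :: l).Pairwise (· < ·) →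
    mx ∈ v :: l → (∀ x ∈ v :: l, x ≤ mx) →
    outerA e mx ((innerA e v k).1 + 1) (res ++ [(innerA e v k).2]) = res ++ gRun v k l := by
  intro l
  induction l with
  | nil =>
    intro v k res hmem _ hmx _
    have hv : v ∈ e := (hmem v le_rfl).mpr (by simp)
    have hv1 : v + 1 ∉ e := by
      intro h; have := (hmem (v + 1) (by omega)).mp h; simp at this
    rw [innerA_mem k hv, innerA_not_mem (k + 1) hv1]
    have hmxv : mx = v := by simpa using hmx
    show outerA e mx (v + 1 + 1) (res ++ [k + 1]) = res ++ gRun v k []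
    have hstop : ¬ (v + 1 + 1 ≤ mx) := by omega
    rw [outerA_gt _ hstop]
    simp [gRun]
  | cons c l' ih =>
    intro v k res hmem hp hmx hub
    have hvc : v < c := (List.pairwise_cons.mp hp).1 c (by simp)
    have hp' : (c :: l').Pairwise (· < ·) := (List.pairwise_cons.mp hp).2
    have hcl : ∀ x ∈ c :: l', c ≤ x := pairwise_head_le hp'
    have hcmx : c ≤ mx := hub c (by simp)
    have hmx' : mx ∈ c :: l' := by
      rcases List.mem_cons.mp hmx with rfl | h
      · omega
      · exact h
    have hub' : ∀ x ∈ c :: l', x ≤ mx := fun x hx => hub x (List.mem_cons_of_mem _ hx)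
    have hv : v ∈ e := (hmem v le_rfl).mpr (by simp)
    rw [innerA_mem k hv]
    by_cases hc : c = v + 1
    · subst hc
      have hmem' : ∀ x : Int, v + 1 ≤ x → (x ∈ e ↔ x ∈ (v + 1) :: l') := by
        intro x hx
        rw [hmem x (by omega)]
        constructor
        · intro h; rcases List.mem_cons.mp h with rfl | h; · omega
          · exact h
        · intro h; exact List.mem_cons_of_mem _ h
      rw [ih (v + 1) (k + 1) res hmem' hp' hmx' hub']
      simp [gRun]
    · have hc2 : v + 2 ≤ c := by omega
      have hv1 : v + 1 ∉ e := by
        intro h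
        have := (hmem (v + 1) (by omega)).mp h
        rcases List.mem_cons.mp this with h1 | h1
        · omega
        · have := hcl _ h1; omega
      rw [innerA_not_mem (k + 1) hv1]
      show outerA e mx (v + 1 + 1) (res ++ [k + 1]) = res ++ gRun v k (c :: l')
      have hgap := gapA e mx (c - v - 2).toNat (v + 1 + 1) (res ++ [k + 1])
        (by
          intro j h1 h2 hj
          have := (hmem j (by omega)).mp hj
          rcases List.mem_cons.mp this with h3 | h3
          · omega
          · have := hcl _ h3; omega)
        (by omega)
      have hcv : (v + 1 + 1) + ((c - v - 2).toNat : Int) = c := by omega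
      rw [hcv] at hgap
      rw [hgap]
      have hmem' : ∀ x : Int, c ≤ x → (x ∈ e ↔ x ∈ c :: l') := by
        intro x hx
        rw [hmem x (by omega)]
        constructor
        · intro h; rcases List.mem_cons.mp h with rfl | h; · omega
          · exact h
        · intro h; exact List.mem_cons_of_mem _ h
      rw [outerA_le _ hcmx, ih c 1 (res ++ [k + 1] ++ List.replicate (c - v - 2).toNat 1) hmem' hp' hmx' hub']
      simp [gRun, hc]

-- ===== VERDICT (by name: the statement is the Claim_ definition above) =====
theorem calcul_coef_py_spec : Claim_equal_calcul_coef_py := by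
  intro e _
  unfold Spec_calcul_coef_py calcul_coef_py calcul_coef_py_alt
  by_cases he : e = []
  · simp [he]
  · have hlen : ¬ e.length = 0 := by simpa using he
    simp only [he, hlen, if_false]
    set vs := PySem.List.sorted (PySem.Set.ofList e) (fun x => x) false with hvs
    have hvsne : vs ≠ [] := by
      rw [hvs, Ne, PySem.List.sorted_eq_nil_iff]
      intro h
      rcases List.exists_cons_of_ne_nil he with ⟨a, t, rfl⟩
      have : a ∈ PySem.Set.ofList (a :: t) := by
        rw [PySem.Set.mem_ofList]; simp
      simp [h] at this
    obtain ⟨v, l, hvl⟩ := List.exists_cons_of_ne_nil hvsne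
    have hpw : vs.Pairwise (· < ·) := by
      rw [hvs]; exact PySem.List.sorted_ofList_pairwise_lt e
    have hmemvs : ∀ x : Int, x ∈ vs ↔ x ∈ e := by
      intro x
      rw [hvs, PySem.List.mem_sorted, PySem.Set.mem_ofList]
    -- min
    obtain ⟨m, hm⟩ : ∃ m, PySem.List.min? e (fun x => x) = some m := by
      cases h : PySem.List.min? e (fun x => x) with
      | none => exact absurd ((PySem.List.min?_eq_none_iff e _).mp h) he
      | some m => exact ⟨m, rfl⟩
    have hmmem : m ∈ e := PySem.List.min?_mem hm
    have hmmin : ∀ y ∈ e, m ≤ y := by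
      intro y hy; exact PySem.List.min?_isMin hm y hy
    have hmv : m = v := by
      have h1 : m ≤ v := hmmin v ((hmemvs v).mp (by rw [hvl]; simp))
      have h2 : v ≤ m := by
        have : m ∈ vs := (hmemvs m).mpr hmmem
        rw [hvl] at this hpw
        exact pairwise_head_le hpw m this
      omega
    -- max
    obtain ⟨M, hM⟩ : ∃ M, PySem.List.max? e (fun x => x) = some M := by
      cases h : PySem.List.max? e (fun x => x) with
      | none => exact absurd ((PySem.List.max?_eq_none_iff e _).mp h) he
      | some M => exact ⟨M, rfl⟩
    have hMmem : M ∈ vs := (hmemvs M).mpr (PySem.List.max?_mem hM)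
    have hMub : ∀ x ∈ vs, x ≤ M := by
      intro x hx; exact PySem.List.max?_isMax hM x ((hmemvs x).mp hx)
    have hmemh : ∀ x : Int, v ≤ x → (x ∈ e ↔ x ∈ v :: l) := by
      intro x _; rw [← hvl]; exact (hmemvs x).symm
    have hvM : v ≤ M := hMub v (by rw [hvl]; simp)
    rw [hm, hM]
    simp only [Option.getD_some]
    rw [hmv]
    rw [outerA_le ([] : List Int) hvM]
    rw [hvl] at hpw hMmem hMub
    have hA := mainA e M l v 1 [] hmemh hpw hMmem hMub
    rw [hA]
    have hB := bfold l v 1 []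
    rw [hvl]
    simp only [List.tail_cons, List.nil_append] at hB ⊢
    exact hB.symm
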